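-- pv_equiv track=rewrite | github.com/ivi982010/SySdL-TPs | Lexer.py | a_Coma
-- ===== SOURCE A (Python) =====
-- def a_Coma (tokens, acu):
--     s = 0
--     for c in acu:
--         if c == ',':
--             s = 1
--         else:
--             s = -1
--     if s == 1:
--         tokens.append(("<Comma>", acu))
--     return (s == 1)
-- ===== SOURCE B (Python) =====
-- def a_Coma(tokens, acu):
--     ok = bool(acu) and acu[-1] == ','
--     if ok:
--         tokens.append(("<Comma>", acu))
--     return ok
-- ===== Notes on version B (the rewrite author's own statement) =====
-- stated objective: simpler
-- what changed: Replaces the per-character scan (whose state only reflects the last character) with a direct O(1) check of the final character of acu.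
import Mathlib
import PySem

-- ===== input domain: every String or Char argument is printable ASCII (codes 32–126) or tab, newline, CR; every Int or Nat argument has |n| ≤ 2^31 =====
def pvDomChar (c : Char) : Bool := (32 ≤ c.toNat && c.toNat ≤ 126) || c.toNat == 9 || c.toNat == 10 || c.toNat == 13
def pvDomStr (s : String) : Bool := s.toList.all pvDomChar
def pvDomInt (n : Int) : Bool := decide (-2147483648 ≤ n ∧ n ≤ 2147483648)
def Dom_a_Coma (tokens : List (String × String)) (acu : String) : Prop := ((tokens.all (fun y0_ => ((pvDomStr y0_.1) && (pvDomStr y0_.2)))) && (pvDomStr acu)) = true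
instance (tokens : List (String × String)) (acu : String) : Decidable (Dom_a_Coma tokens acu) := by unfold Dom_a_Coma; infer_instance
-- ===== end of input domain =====

-- B replaces A's per-character scan with an O(1) check of acu's last character.
-- Both versions append ("<Comma>", acu) to tokens when they return true; the
-- theorems here are about the RETURN value only (the mutation is identical).

-- ===== PORT A =====
-- literal port of A's loop: s starts at 0, each character overwrites it
def a_Coma (tokens : List (String × String)) (acu : String) : Bool :=
  let s : Int := acu.toList.foldl (fun _ c => if c = ',' then 1 else -1) 0
  s == 1

-- ===== PORT B =====
-- literal port of B: bool(acu) and acu[-1] == ','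
def a_Coma_alt (tokens : List (String × String)) (acu : String) : Bool :=
  !acu.toList.isEmpty && (PySem.Str.pyGet? acu (-1) == some ',')

-- ===== PRECONDITION & SPEC =====
def Spec_a_Coma (tokens : List (String × String)) (acu : String) (out : Bool) : Prop := out = a_Coma_alt tokens acu
instance (tokens : List (String × String)) (acu : String) (out : Bool) : Decidable (Spec_a_Coma tokens acu out) := by unfold Spec_a_Coma; infer_instance

-- ===== CLAIM (what is proved, stated in full; the proofs are below) =====
def Claim_equal_a_Coma : Prop := ∀ (tokens : List (String × String)) (acu : String), Dom_a_Coma tokens acu → Spec_a_Coma tokens acu (a_Coma tokens acu)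

-- ===== LEMMAS AND PROOFS =====

-- A's fold state only reflects the last character; B reads that character directly
theorem pv_key (l : List Char) :
    ((l.foldl (fun _ c => if c = ',' then (1 : Int) else -1) 0) == 1)
      = (!l.isEmpty && (PySem.List.pyGet? l (-1) == some ',')) := by
  rw [PySem.List.pyGet?_neg_one]
  induction l using List.reverseRecOn with
  | nil => simp
  | append_singleton l c _ =>
    by_cases h : c = ',' <;> simp [List.foldl_append, h]

-- ===== VERDICT (by name: the statement is the Claim_ definition above) =====
theorem a_Coma_spec : Claim_equal_a_Coma := by
  intro tokens acu _
  unfold Spec_a_Coma a_Coma a_Coma_alt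
  simpa [PySem.Str.pyGet?, PySem.Chars.pyGet?] using pv_key acu.toList
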